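-- pv_equiv track=rewrite | github.com/Rajat-Chaudhari/SalesForecast | data_loader.py | validate_and_confirm_models
-- ===== SOURCE A (Python) =====
-- def validate_and_confirm_models(user_models, repo_models):
--     try:
--         # Find models that are available in the repository
--         available_models = [model for model in user_models if model in repo_models]
--         # Find models that are not available in the repository
--         unavailable_models = [model for model in user_models if model not in repo_models]
--         if not available_models:
--             return 7
--         if unavailable_models:
--             return 8
--
--         return 0
--
--     except Exception as e:
--
--         return 6
-- ===== SOURCE B (Python) =====
-- def validate_and_confirm_models(user_models, repo_models):
--     try:
--         # Set-algebra formulation: dedupe once, then decide via subset/intersection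
--         users = set(user_models)
--         repo = set(repo_models)
--         if users <= repo:
--             return 0 if users else 7
--         if users & repo:
--             return 8
--         return 7
--     except Exception:
--         return 6
-- ===== Notes on version B (the rewrite author's own statement) =====
-- stated objective: faster
-- what changed: Replaces the two filtering passes over user_models (linear list membership per element) with set algebra: build set(user_models) and set(repo_models) once, then decide the result by a subset test (all available -> 0, or 7 if empty) and an intersection test (partially available -> 8, none -> 7).
import Mathlib
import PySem

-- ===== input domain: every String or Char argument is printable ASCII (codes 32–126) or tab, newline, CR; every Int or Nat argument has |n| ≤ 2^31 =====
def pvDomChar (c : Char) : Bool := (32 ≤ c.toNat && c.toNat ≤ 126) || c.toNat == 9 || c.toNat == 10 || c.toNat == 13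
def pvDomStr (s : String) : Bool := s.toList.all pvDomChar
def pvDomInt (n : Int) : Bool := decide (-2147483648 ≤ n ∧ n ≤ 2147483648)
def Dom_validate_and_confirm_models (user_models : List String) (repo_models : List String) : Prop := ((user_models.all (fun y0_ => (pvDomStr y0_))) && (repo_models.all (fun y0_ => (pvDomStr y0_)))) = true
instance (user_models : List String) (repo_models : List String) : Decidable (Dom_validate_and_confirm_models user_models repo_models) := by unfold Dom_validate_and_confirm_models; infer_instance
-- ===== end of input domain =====

-- B uses set algebra (subset and intersection of deduplicated sets) instead of A's two filtering passes; same result, alternative structure.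

-- ===== PORT A =====
def validate_and_confirm_models (user_models : List String) (repo_models : List String) : Int :=
  let available_models := user_models.filter (fun model => repo_models.contains model)
  let unavailable_models := user_models.filter (fun model => !(repo_models.contains model))
  if available_models.isEmpty then 7
  else if !unavailable_models.isEmpty then 8
  else 0

-- ===== PORT B =====
-- set(user_models), set(repo_models), then subset / intersection tests
def validate_and_confirm_models_alt (user_models : List String) (repo_models : List String) : Int :=
  let users : PySem.Set String := PySem.Set.ofList user_models
  let repo : PySem.Set String := PySem.Set.ofList repo_models
  if PySem.Set.issubset users repo then
    (if users.isEmpty then 7 else 0)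
  else if !(PySem.Set.inter users repo).isEmpty then 8
  else 7

-- ===== PRECONDITION & SPEC =====
def Spec_validate_and_confirm_models (user_models : List String) (repo_models : List String) (out : Int) : Prop := out = validate_and_confirm_models_alt user_models repo_models
instance (user_models : List String) (repo_models : List String) (out : Int) : Decidable (Spec_validate_and_confirm_models user_models repo_models out) := by unfold Spec_validate_and_confirm_models; infer_instance

-- ===== CLAIM =====
def Claim_equal_validate_and_confirm_models : Prop := ∀ (user_models : List String) (repo_models : List String), Dom_validate_and_confirm_models user_models repo_models → Spec_validate_and_confirm_models user_models repo_models (validate_and_confirm_models user_models repo_models)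

-- ===== LEMMAS AND PROOFS =====

lemma availEmpty_iff (u r : List String) :
    ((u.filter (fun model => r.contains model)).isEmpty = true) ↔ ∀ x ∈ u, x ∉ r := by
  simp [List.isEmpty_iff, List.filter_eq_nil_iff]

lemma unavailEmpty_iff (u r : List String) :
    ((u.filter (fun model => !r.contains model)).isEmpty = true) ↔ ∀ x ∈ u, x ∈ r := by
  simp [List.isEmpty_iff, List.filter_eq_nil_iff]

lemma issubset_ofList_iff (u r : List String) :
    (PySem.Set.issubset (PySem.Set.ofList u) (PySem.Set.ofList r) = true) ↔ ∀ x ∈ u, x ∈ r := by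
  simp [PySem.Set.issubset_iff, PySem.Set.mem_ofList]

lemma interEmpty_iff (u r : List String) :
    ((PySem.Set.inter (PySem.Set.ofList u) (PySem.Set.ofList r)).isEmpty = true) ↔ ∀ x ∈ u, x ∉ r := by
  simp [PySem.Set.inter, List.isEmpty_iff, List.filter_eq_nil_iff, PySem.Set.contains,
    PySem.Set.mem_ofList]

lemma ofList_isEmpty_iff (u : List String) :
    ((PySem.Set.ofList u : PySem.Set String).isEmpty = true) ↔ u = [] := by
  constructor
  · intro h
    cases u with
    | nil => rfl
    | cons a as =>
      exfalso
      have ha : a ∈ PySem.Set.ofList (a :: as) := by simp [PySem.Set.mem_ofList]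
      rw [List.isEmpty_iff] at h
      simp [h] at ha
  · rintro rfl; rfl

-- ===== VERDICT =====
theorem validate_and_confirm_models_spec : Claim_equal_validate_and_confirm_models := by
  intro u r _
  unfold Spec_validate_and_confirm_models validate_and_confirm_models validate_and_confirm_models_alt
  by_cases hav : ∀ x ∈ u, x ∉ r
  · -- no user model is available: both sides return 7
    rw [if_pos ((availEmpty_iff u r).2 hav)]
    cases u with
    | nil =>
      rw [if_pos ((issubset_ofList_iff [] r).2 (by intro x hx; cases hx)),
          if_pos ((ofList_isEmpty_iff []).2 rfl)]
    | cons a as =>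
      have hsub : PySem.Set.issubset (PySem.Set.ofList (a :: as)) (PySem.Set.ofList r) = false :=
        Bool.eq_false_iff.2 (fun h =>
          hav a (by simp) ((issubset_ofList_iff (a :: as) r).1 h a (by simp)))
      have hint : (PySem.Set.inter (PySem.Set.ofList (a :: as)) (PySem.Set.ofList r)).isEmpty = true :=
        (interEmpty_iff (a :: as) r).2 hav
      rw [if_neg (by rw [hsub]; decide), if_neg (by rw [hint]; decide)]
  · -- some user model is available
    have ⟨v, hvu, hvr⟩ : ∃ x ∈ u, x ∈ r := by
      by_contra h
      exact hav (fun x hx hr => h ⟨x, hx, hr⟩)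
    have havail : (u.filter (fun model => r.contains model)).isEmpty = false :=
      Bool.eq_false_iff.2 (fun h => (availEmpty_iff u r).1 h v hvu hvr)
    rw [if_neg (by rw [havail]; decide)]
    by_cases hall : ∀ x ∈ u, x ∈ r
    · -- everything available: both return 0
      have hun : (u.filter (fun model => !r.contains model)).isEmpty = true :=
        (unavailEmpty_iff u r).2 hall
      have hne : (PySem.Set.ofList u : PySem.Set String).isEmpty = false :=
        Bool.eq_false_iff.2 (fun h => by
          have := (ofList_isEmpty_iff u).1 h
          subst this; cases hvu)
      rw [if_neg (by rw [hun]; decide), if_pos ((issubset_ofList_iff u r).2 hall),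
          if_neg (by rw [hne]; decide)]
    · -- partially available: both return 8
      have ⟨w, hwu, hwr⟩ : ∃ x ∈ u, x ∉ r := by
        by_contra h
        exact hall (fun x hx => by
          by_contra hr
          exact h ⟨x, hx, hr⟩)
      have hun : (u.filter (fun model => !r.contains model)).isEmpty = false :=
        Bool.eq_false_iff.2 (fun h => hwr ((unavailEmpty_iff u r).1 h w hwu))
      have hsub : PySem.Set.issubset (PySem.Set.ofList u) (PySem.Set.ofList r) = false :=
        Bool.eq_false_iff.2 (fun h => hwr ((issubset_ofList_iff u r).1 h w hwu))
      have hint : (PySem.Set.inter (PySem.Set.ofList u) (PySem.Set.ofList r)).isEmpty = false :=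
        Bool.eq_false_iff.2 (fun h => (interEmpty_iff u r).1 h v hvu hvr)
      rw [if_pos (by rw [hun]; decide), if_neg (by rw [hsub]; decide), if_pos (by rw [hint]; decide)]
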